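-- pv_equiv track=rewrite | github.com/3x0t3ch/TheAPEX-opensource- | app/local_analysis.py | calculate_final_verdict
-- ===== SOURCE A (Python) =====
-- from typing import Dict, Any
--
-- def calculate_final_verdict(lv: str, er: Dict[str, Any]) -> str:
--     """[CORE LOGIC] Veredito Final."""
--     _v = [r.get('verdict') for r in er.values() if r and 'verdict' in r]
--     if lv != 'unknown': _v.append(lv)
--     if not _v: return 'unknown'
--
--     # Obfuscated priority logic
--     _p = {'malicious': 3, 'suspicious': 2, 'clean': 1, 'unknown': 0}
--     _m = max([_p.get(x, 0) for x in _v])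
--
--     for k, v in _p.items():
--         if v == _m: return k
--     return 'unknown'
-- ===== SOURCE B (Python) =====
-- def calculate_final_verdict(lv: str, er) -> str:
--     """Same verdicts, but chosen by scanning the priority tiers in descending
--     order and returning the first tier present, instead of computing a numeric
--     max and reverse-scanning the priority dict."""
--     present = [r.get('verdict') for r in er.values() if r and 'verdict' in r]
--     if lv != 'unknown':
--         present.append(lv)
--     for tier in ('malicious', 'suspicious', 'clean'):
--         if tier in present:
--             return tier
--     return 'unknown'
-- ===== Notes on version B (the rewrite author's own statement) =====
-- stated objective: simpler
-- what changed: Replaced the numeric priority-max over a score dict plus a reverse dict scan by a direct descending scan over the three priority tiers, returning the first tier present among the collected verdicts (unknown otherwise).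
import Mathlib
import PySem

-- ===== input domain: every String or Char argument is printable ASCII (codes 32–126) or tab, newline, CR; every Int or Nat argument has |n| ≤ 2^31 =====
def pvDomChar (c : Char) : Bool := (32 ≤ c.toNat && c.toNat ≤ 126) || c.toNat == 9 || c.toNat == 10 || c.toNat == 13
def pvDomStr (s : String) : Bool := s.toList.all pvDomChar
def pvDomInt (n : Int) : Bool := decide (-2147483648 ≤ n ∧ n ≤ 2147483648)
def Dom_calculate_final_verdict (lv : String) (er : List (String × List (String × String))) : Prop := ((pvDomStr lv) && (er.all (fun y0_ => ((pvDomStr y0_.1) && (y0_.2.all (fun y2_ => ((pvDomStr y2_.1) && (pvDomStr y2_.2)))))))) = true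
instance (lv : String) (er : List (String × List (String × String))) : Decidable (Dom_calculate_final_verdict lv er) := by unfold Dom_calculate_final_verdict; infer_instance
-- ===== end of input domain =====

-- B replaces A's numeric priority-max + reverse dict scan by a descending scan
-- over the three priority tiers (objective: simpler).


-- ===== PORT A =====
def calculate_final_verdict (lv : String) (er : List (String × List (String × String))) : String :=
  -- _v = [r.get('verdict') for r in er.values() if r and 'verdict' in r]
  -- (r.get('verdict') is always present under the guard; .getD "" only discharges the Option)
  let _v : List String :=
    (((PySem.Dict.mk er).values.filter
        (fun r => !r.isEmpty && PySem.Dict.contains (PySem.Dict.mk r) "verdict")).map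
      (fun r => ((PySem.Dict.mk r).get? "verdict").getD ""))
  let _v := if lv ≠ "unknown" then _v ++ [lv] else _v
  if _v.isEmpty then "unknown"
  else
    let _p : PySem.Dict String Int :=
      PySem.Dict.mk [("malicious", 3), ("suspicious", 2), ("clean", 1), ("unknown", 0)]
    -- _m = max([...]); the list is nonempty here, so .getD 0 never fires
    let _m : Int := (PySem.List.max? (_v.map (fun x => _p.getD x 0)) (fun y => y)).getD 0
    match _p.items.find? (fun kv => kv.2 == _m) with
    | some kv => kv.1
    | none => "unknown"

-- ===== PORT B =====
def calculate_final_verdict_alt (lv : String) (er : List (String × List (String × String))) : String :=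
  let present : List String :=
    (((PySem.Dict.mk er).values.filter
        (fun r => !r.isEmpty && PySem.Dict.contains (PySem.Dict.mk r) "verdict")).map
      (fun r => ((PySem.Dict.mk r).get? "verdict").getD ""))
  let present := if lv ≠ "unknown" then present ++ [lv] else present
  if present.contains "malicious" then "malicious"
  else if present.contains "suspicious" then "suspicious"
  else if present.contains "clean" then "clean"
  else "unknown"

-- ===== PRECONDITION & SPEC =====
def Spec_calculate_final_verdict (lv : String) (er : List (String × List (String × String))) (out : String) : Prop := out = calculate_final_verdict_alt lv er
instance (lv : String) (er : List (String × List (String × String))) (out : String) : Decidable (Spec_calculate_final_verdict lv er out) := by unfold Spec_calculate_final_verdict; infer_instance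

-- ===== CLAIM (what is proved, stated in full; the proofs are below) =====
def Claim_equal_calculate_final_verdict : Prop := ∀ (lv : String) (er : List (String × List (String × String))), Dom_calculate_final_verdict lv er → Spec_calculate_final_verdict lv er (calculate_final_verdict lv er)

-- ===== LEMMAS AND PROOFS =====

def pvPrio (x : String) : Int :=
  if "malicious" = x then 3 else if "suspicious" = x then 2 else if "clean" = x then 1 else 0

lemma pvGetD_prio (x : String) :
    PySem.Dict.getD (PySem.Dict.mk [("malicious", (3 : Int)), ("suspicious", 2), ("clean", 1), ("unknown", 0)]) x 0 = pvPrio x := by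
  simp only [PySem.Dict.getD_eq_get?_getD, PySem.Dict.get?_mk_cons, pvPrio]
  by_cases h1 : "malicious" = x <;> by_cases h2 : "suspicious" = x <;>
    by_cases h3 : "clean" = x <;> by_cases h4 : "unknown" = x <;>
    simp_all [beq_iff_eq, PySem.Dict.get?]

lemma pvPrio_le_three (x : String) : pvPrio x ≤ 3 := by
  unfold pvPrio; split_ifs <;> norm_num

lemma pvPrio_le_two {x : String} (h : x ≠ "malicious") : pvPrio x ≤ 2 := by
  unfold pvPrio; split_ifs <;> simp_all

lemma pvPrio_le_one {x : String} (h : x ≠ "malicious") (h' : x ≠ "suspicious") : pvPrio x ≤ 1 := by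
  unfold pvPrio; split_ifs <;> simp_all

lemma pvPrio_eq_zero {x : String} (h : x ≠ "malicious") (h' : x ≠ "suspicious") (h'' : x ≠ "clean") : pvPrio x = 0 := by
  unfold pvPrio; split_ifs <;> simp_all

lemma pvSel_eq (vs : List String) :
    (if vs.isEmpty then "unknown"
     else
       let _p : PySem.Dict String Int :=
         PySem.Dict.mk [("malicious", 3), ("suspicious", 2), ("clean", 1), ("unknown", 0)]
       let _m : Int := (PySem.List.max? (vs.map (fun x => _p.getD x 0)) (fun y => y)).getD 0
       match _p.items.find? (fun kv => kv.2 == _m) with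
       | some kv => kv.1
       | none => "unknown")
    = (if vs.contains "malicious" then "malicious"
       else if vs.contains "suspicious" then "suspicious"
       else if vs.contains "clean" then "clean"
       else "unknown") := by
  by_cases hE : vs = []
  · simp [hE]
  · have hne : vs.isEmpty = false := by simp [hE]
    simp only [hne, Bool.false_eq_true, if_false]
    have hmap : vs.map (fun x => PySem.Dict.getD (PySem.Dict.mk [("malicious", (3:Int)), ("suspicious", 2), ("clean", 1), ("unknown", 0)]) x 0) = vs.map pvPrio := by
      simp [pvGetD_prio]
    rw [hmap]
    cases hM : PySem.List.max? (vs.map pvPrio) (fun y => y) with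
    | none =>
        exact absurd (by simpa using (PySem.List.max?_eq_none_iff _ _).1 hM) hE
    | some M =>
        obtain ⟨x0, hx0, hpx0⟩ := List.mem_map.1 (PySem.List.max?_mem hM)
        have hub : ∀ x ∈ vs, pvPrio x ≤ M := by
          intro x hx
          simpa using PySem.List.max?_isMax hM _ (List.mem_map_of_mem hx)
        by_cases h3 : "malicious" ∈ vs
        · have hM3 : M = 3 := le_antisymm (hpx0 ▸ pvPrio_le_three x0)
            (by simpa [pvPrio] using hub _ h3)
          simp [hM3, List.find?, h3]
        · have hle2 : ∀ x ∈ vs, pvPrio x ≤ 2 := fun x hx =>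
            pvPrio_le_two (fun h => h3 (h ▸ hx))
          by_cases h2 : "suspicious" ∈ vs
          · have hM2 : M = 2 := le_antisymm (hpx0 ▸ hle2 x0 hx0)
              (by simpa [pvPrio] using hub _ h2)
            simp [hM2, List.find?, h3, h2]
          · have hle1 : ∀ x ∈ vs, pvPrio x ≤ 1 := fun x hx =>
              pvPrio_le_one (fun h => h3 (h ▸ hx)) (fun h => h2 (h ▸ hx))
            by_cases h1 : "clean" ∈ vs
            · have hM1 : M = 1 := le_antisymm (hpx0 ▸ hle1 x0 hx0)
                (by simpa [pvPrio] using hub _ h1)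
              simp [hM1, List.find?, h3, h2, h1]
            · have hz : pvPrio x0 = 0 :=
                pvPrio_eq_zero (fun h => h3 (h ▸ hx0)) (fun h => h2 (h ▸ hx0)) (fun h => h1 (h ▸ hx0))
              have hM0 : M = 0 := by rw [← hpx0, hz]
              simp [hM0, List.find?, h3, h2, h1]

-- ===== VERDICT (by name: the statement is the Claim_ definition above) =====
theorem calculate_final_verdict_spec : Claim_equal_calculate_final_verdict := by
  intro lv er _
  unfold Spec_calculate_final_verdict calculate_final_verdict calculate_final_verdict_alt
  exact pvSel_eq _
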